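-- pv_equiv track=rewrite | github.com/serixscorpio/advent-of-code-2023 | src/advent_of_code_2023/day18.py | dig_boundaries
-- ===== SOURCE A (Python) =====
-- def dig_boundaries(steps: list[tuple[str, int]]) -> list[tuple[int, int]]:
--     boundaries = [(0, 0)]  # (row, col)
--     for direction, distance in steps:
--         if direction == "U":
--             boundaries.append((boundaries[-1][0] - distance, boundaries[-1][1]))
--         if direction == "D":
--             boundaries.append((boundaries[-1][0] + distance, boundaries[-1][1]))
--         if direction == "L":
--             boundaries.append((boundaries[-1][0], boundaries[-1][1] - distance))
--         if direction == "R":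
--             boundaries.append((boundaries[-1][0], boundaries[-1][1] + distance))
--     return boundaries
-- ===== SOURCE B (Python) =====
-- from itertools import accumulate
--
--
-- def dig_boundaries(steps: list[tuple[str, int]]) -> list[tuple[int, int]]:
--     # Axis decomposition: a valid step moves along exactly one axis, so the row
--     # and column coordinates evolve independently.  Compute each axis as its own
--     # scalar prefix sum and pair them up at the end.
--     moves = [(d, n) for d, n in steps if d in ("U", "D", "L", "R")]
--     row_deltas = [-n if d == "U" else n if d == "D" else 0 for d, n in moves]
--     col_deltas = [-n if d == "L" else n if d == "R" else 0 for d, n in moves]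
--     rows = list(accumulate(row_deltas, initial=0))
--     cols = list(accumulate(col_deltas, initial=0))
--     return list(zip(rows, cols))
-- ===== Notes on version B (the rewrite author's own statement) =====
-- stated objective: alternative
-- what changed: B decomposes the problem by axis: it filters the valid steps once, builds two independent scalar delta lists (row deltas from U/D, column deltas from L/R), takes two separate scalar prefix sums, and zips them, whereas A runs one pass maintaining the current point as a pair and appending to the result list.
import Mathlib
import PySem

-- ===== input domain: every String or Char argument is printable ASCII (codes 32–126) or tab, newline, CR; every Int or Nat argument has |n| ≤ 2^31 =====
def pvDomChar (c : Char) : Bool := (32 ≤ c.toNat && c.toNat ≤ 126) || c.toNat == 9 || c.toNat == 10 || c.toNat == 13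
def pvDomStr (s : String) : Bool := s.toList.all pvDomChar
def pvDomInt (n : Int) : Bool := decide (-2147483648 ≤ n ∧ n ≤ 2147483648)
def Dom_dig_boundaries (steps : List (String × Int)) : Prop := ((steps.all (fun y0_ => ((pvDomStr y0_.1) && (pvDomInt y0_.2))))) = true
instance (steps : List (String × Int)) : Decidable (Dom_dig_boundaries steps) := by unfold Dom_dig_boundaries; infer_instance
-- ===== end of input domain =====

-- B decomposes by axis: filter valid steps, take two independent scalar prefix sums
-- (rows from U/D, cols from L/R) and zip them; A runs one pass over pairs.

-- ===== PORT A =====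
-- the loop body: four sequential ifs, each appending based on the CURRENT last element
-- (boundaries[-1]; the list is always nonempty, so getLast?.getD never takes the default)
def pvStepA (b : List (Int × Int)) (s : String × Int) : List (Int × Int) :=
  let b1 := if s.1 = "U" then b ++ [(((b.getLast?.getD (0, 0)).1 - s.2, (b.getLast?.getD (0, 0)).2))] else b
  let b2 := if s.1 = "D" then b1 ++ [(((b1.getLast?.getD (0, 0)).1 + s.2, (b1.getLast?.getD (0, 0)).2))] else b1
  let b3 := if s.1 = "L" then b2 ++ [(((b2.getLast?.getD (0, 0)).1, (b2.getLast?.getD (0, 0)).2 - s.2))] else b2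
  let b4 := if s.1 = "R" then b3 ++ [(((b3.getLast?.getD (0, 0)).1, (b3.getLast?.getD (0, 0)).2 + s.2))] else b3
  b4

def dig_boundaries (steps : List (String × Int)) : List (Int × Int) :=
  steps.foldl pvStepA [(0, 0)]

-- ===== PORT B =====
-- d in ("U","D","L","R")
def pvValid (s : String × Int) : Bool :=
  s.1 = "U" || s.1 = "D" || s.1 = "L" || s.1 = "R"

-- -n if d == "U" else n if d == "D" else 0
def pvRowDelta (s : String × Int) : Int :=
  if s.1 = "U" then -s.2 else if s.1 = "D" then s.2 else 0

-- -n if d == "L" else n if d == "R" else 0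
def pvColDelta (s : String × Int) : Int :=
  if s.1 = "L" then -s.2 else if s.1 = "R" then s.2 else 0

def dig_boundaries_alt (steps : List (String × Int)) : List (Int × Int) :=
  let moves := steps.filter pvValid
  let rows := List.scanl (· + ·) (0 : Int) (moves.map pvRowDelta)
  let cols := List.scanl (· + ·) (0 : Int) (moves.map pvColDelta)
  rows.zip cols

-- ===== PRECONDITION & SPEC =====
def Spec_dig_boundaries (steps : List (String × Int)) (out : List (Int × Int)) : Prop := out = dig_boundaries_alt steps
instance (steps : List (String × Int)) (out : List (Int × Int)) : Decidable (Spec_dig_boundaries steps out) := by unfold Spec_dig_boundaries; infer_instance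

-- ===== CLAIM (what is proved, stated in full; the proofs are below) =====
def Claim_equal_dig_boundaries : Prop := ∀ (steps : List (String × Int)), Dom_dig_boundaries steps → Spec_dig_boundaries steps (dig_boundaries steps)

-- ===== LEMMAS AND PROOFS =====

-- proof-side helper: the pair delta a valid step contributes (none = skipped)
def pvDelta (s : String × Int) : Option (Int × Int) :=
  if pvValid s then some (pvRowDelta s, pvColDelta s) else none

lemma pvStepA_delta (b : List (Int × Int)) (s : String × Int) :
    pvStepA b s = match pvDelta s with
      | some q => b ++ [((b.getLast?.getD (0, 0)).1 + q.1, (b.getLast?.getD (0, 0)).2 + q.2)]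
      | none => b := by
  unfold pvStepA pvDelta pvValid pvRowDelta pvColDelta
  by_cases hU : s.1 = "U" <;> by_cases hD : s.1 = "D" <;> by_cases hL : s.1 = "L" <;>
    by_cases hR : s.1 = "R" <;>
    simp_all <;> ring_nf

lemma pvFold_key (steps : List (String × Int)) :
    ∀ (b : List (Int × Int)) (p : Int × Int), b.getLast? = some p →
      steps.foldl pvStepA b =
        b.dropLast ++ List.scanl (fun p q => (p.1 + q.1, p.2 + q.2)) p (steps.filterMap pvDelta) := by
  induction steps with
  | nil =>
    intro b p hp
    have hb : b ≠ [] := by intro h; simp [h] at hp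
    have : b.getLast hb = p := (List.getLast_eq_iff_getLast?_eq_some hb).mpr hp
    simp [List.scanl, ← this, List.dropLast_append_getLast hb]
  | cons s rest ih =>
    intro b p hp
    simp only [List.foldl_cons, List.filterMap_cons, pvStepA_delta]
    cases hq : pvDelta s with
    | none => simp [ih b p hp]
    | some q =>
      have hb : b ≠ [] := by intro h; simp [h] at hp
      have hlast : b.getLast?.getD (0, 0) = p := by simp [hp]
      rw [hlast]
      have h2 : (b ++ [(p.1 + q.1, p.2 + q.2)]).getLast? = some (p.1 + q.1, p.2 + q.2) :=
        List.getLast?_concat ..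
      rw [ih _ _ h2]
      have hgl : b.getLast hb = p := (List.getLast_eq_iff_getLast?_eq_some hb).mpr hp
      simp only [List.scanl_cons, List.dropLast_concat]
      rw [← List.singleton_append, ← List.append_assoc, ← hgl, List.dropLast_append_getLast hb]

-- the pair deltas are the row/col deltas of the valid steps
lemma pvFilterMap_delta (steps : List (String × Int)) :
    steps.filterMap pvDelta = (steps.filter pvValid).map (fun s => (pvRowDelta s, pvColDelta s)) := by
  induction steps with
  | nil => rfl
  | cons s rest ih =>
    rw [List.filterMap_cons, List.filter_cons, ih]
    by_cases h : pvValid s <;> simp [pvDelta, h]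

-- a pairwise scan is the zip of the two scalar scans
lemma pvScanl_pair (xs : List ((Int × Int))) :
    ∀ (a b : Int),
      List.scanl (fun p q => (p.1 + q.1, p.2 + q.2)) (a, b) xs =
        (List.scanl (· + ·) a (xs.map Prod.fst)).zip (List.scanl (· + ·) b (xs.map Prod.snd)) := by
  induction xs with
  | nil => intro a b; rfl
  | cons x rest ih =>
    intro a b
    simp [List.scanl_cons, ih]

-- ===== VERDICT (by name: the statement is the Claim_ definition above) =====
theorem dig_boundaries_spec : Claim_equal_dig_boundaries := by
  intro steps _
  unfold Spec_dig_boundaries dig_boundaries dig_boundaries_alt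
  rw [pvFold_key steps [(0, 0)] (0, 0) rfl, pvFilterMap_delta, pvScanl_pair]
  simp [Function.comp_def]
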